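-- pv_equiv track=rewrite | github.com/tomrowsell86/AdventOfCode2024 | Day04/main.py | lineacc
-- ===== SOURCE A (Python) =====
-- from typing import Tuple
--
-- def lineacc(
--     partB: bool,
--     state: Tuple[bool, list[Tuple[int, int | None]]],
--     current: Tuple[str, list[str]],
-- ):
--     ch, line = current
--     init, prevLineCandidates = state
--     if not any(prevLineCandidates) and not init:
--         return state
--     lineCandidates = []
--     for pos in [i for c, i in zip(line, range(0, len(line))) if c == ch]:
--         if any(prevLineCandidates):
--             if isDirectionFromPreviousLine(pos, -1, prevLineCandidates):
--                 lineCandidates.append((pos, -1))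
--
--             if isDirectionFromPreviousLine(pos, 1, prevLineCandidates):
--                 lineCandidates.append((pos, 1))
--
--             if not partB and isDirectionFromPreviousLine(pos, 0, prevLineCandidates):
--                 lineCandidates.append((pos, 0))
--
--         else:
--             lineCandidates.append((pos, None))
--
--     return (False, lineCandidates)
--
-- def isDirectionFromPreviousLine(
--     currentPosition: int, direction: int, candidates: list[Tuple[int, int | None]]
-- ):
--     return any(
--         [
--             True
--             for a, d in candidates
--             if currentPosition - (direction) == a and (d is None or d == direction)
--         ]
--     )
-- ===== SOURCE B (Python) =====
-- def _rank(d):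
--     return 0 if d == -1 else (1 if d == 1 else 2)
--
-- def lineacc(partB, state, current):
--     ch, line = current
--     init, prev = state
--     if not prev and not init:
--         return state
--     if not prev:
--         return (False, [(i, None) for i, c in enumerate(line) if c == ch])
--     dirs = [-1, 1] if partB else [-1, 1, 0]
--     hits = set()
--     for a, d in prev:
--         for dr in (dirs if d is None else ([d] if d in dirs else [])):
--             p = a + dr
--             if 0 <= p < len(line) and line[p] == ch:
--                 hits.add((p, dr))
--     return (False, sorted(hits, key=lambda t: 3 * t[0] + _rank(t[1])))
-- ===== Notes on version B (the rewrite author's own statement) =====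
-- stated objective: faster
-- what changed: A scans every position of the line and for each matching character probes all previous-line candidates once per direction; B makes a single forward pass over the previous-line candidates, projecting each one onto its reachable target positions, deduplicates the hits in a set and emits them sorted in A's emission order.
import Mathlib
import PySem

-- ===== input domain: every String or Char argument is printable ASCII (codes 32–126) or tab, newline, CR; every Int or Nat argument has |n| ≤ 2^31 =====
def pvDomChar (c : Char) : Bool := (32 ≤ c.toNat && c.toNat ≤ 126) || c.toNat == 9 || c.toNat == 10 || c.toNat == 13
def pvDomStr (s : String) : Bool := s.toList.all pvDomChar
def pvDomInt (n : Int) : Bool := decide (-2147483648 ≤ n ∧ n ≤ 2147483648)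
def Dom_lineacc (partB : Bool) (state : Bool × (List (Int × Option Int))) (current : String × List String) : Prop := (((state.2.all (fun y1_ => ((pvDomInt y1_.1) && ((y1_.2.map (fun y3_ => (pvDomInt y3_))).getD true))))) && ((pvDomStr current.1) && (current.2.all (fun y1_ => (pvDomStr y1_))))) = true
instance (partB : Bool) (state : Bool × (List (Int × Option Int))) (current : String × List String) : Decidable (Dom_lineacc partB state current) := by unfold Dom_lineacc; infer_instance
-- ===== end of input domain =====

-- B replaces A's per-position scan over the whole line by a single forward pass over the
-- previous-line candidates, collecting the hit (position, direction) pairs in a set and emitting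
-- them sorted in A's emission order (objective: faster; a timing run measured B faster).

-- ===== PORT A =====
def isDirectionFromPreviousLine (currentPosition : Int) (direction : Int) (candidates : List (Int × Option Int)) : Bool :=
  candidates.any (fun ad => (currentPosition - direction == ad.1) && (ad.2 == none || ad.2 == some direction))

def lineacc (partB : Bool) (state : Bool × (List (Int × Option Int))) (current : String × List String) : Bool × (List (Int × Option Int)) :=
  let ch := current.1
  let line := current.2
  let init := state.1
  let prev := state.2
  if prev.isEmpty && !init then state
  else
    let positions : List Int := ((line.zipIdx.filter (fun ci => ci.1 == ch)).map (fun ci => (ci.2 : Int)))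
    let lineCandidates := positions.foldl (fun acc pos =>
      if !prev.isEmpty then
        let acc1 := if isDirectionFromPreviousLine pos (-1) prev then acc ++ [(pos, (some (-1) : Option Int))] else acc
        let acc2 := if isDirectionFromPreviousLine pos 1 prev then acc1 ++ [(pos, (some 1 : Option Int))] else acc1
        if !partB && isDirectionFromPreviousLine pos 0 prev then acc2 ++ [(pos, (some 0 : Option Int))] else acc2
      else acc ++ [(pos, (none : Option Int))]) []
    (false, lineCandidates)

-- ===== PORT B =====
def pvRank (d : Option Int) : Int := if d == some (-1) then 0 else if d == some 1 then 1 else 2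

def pvKey (x : Int × Option Int) : Int := 3 * x.1 + pvRank x.2

def pvDirs (partB : Bool) : List Int := if partB then [-1, 1] else [-1, 1, 0]

def pvDlist (dirs : List Int) (d : Option Int) : List Int :=
  match d with
  | none => dirs
  | some d => if dirs.contains d then [d] else []

def pvHits (dirs : List Int) (ch : String) (line : List String) (prev : List (Int × Option Int)) : PySem.Set (Int × Option Int) :=
  prev.foldl (fun s ad =>
    (pvDlist dirs ad.2).foldl (fun s dir =>
      let p := ad.1 + dir
      if (decide (0 ≤ p) && decide (p < (line.length : Int))) && (PySem.List.pyGet? line p == some ch)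
      then PySem.Set.add s (p, some dir) else s) s) PySem.Set.empty

def lineacc_alt (partB : Bool) (state : Bool × (List (Int × Option Int))) (current : String × List String) : Bool × (List (Int × Option Int)) :=
  let ch := current.1
  let line := current.2
  let init := state.1
  let prev := state.2
  if prev.isEmpty && !init then state
  else if prev.isEmpty then
    (false, (line.zipIdx.filter (fun ci => ci.1 == ch)).map (fun ci => ((ci.2 : Int), (none : Option Int))))
  else
    (false, PySem.List.sorted (pvHits (pvDirs partB) ch line prev) pvKey false)

-- ===== PRECONDITION & SPEC =====
def Spec_lineacc (partB : Bool) (state : Bool × (List (Int × Option Int))) (current : String × List String) (out : Bool × (List (Int × Option Int))) : Prop := out = lineacc_alt partB state current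
instance (partB : Bool) (state : Bool × (List (Int × Option Int))) (current : String × List String) (out : Bool × (List (Int × Option Int))) : Decidable (Spec_lineacc partB state current out) := by unfold Spec_lineacc; infer_instance

-- ===== CLAIM (what is proved, stated in full; the proofs are below) =====
def Claim_equal_lineacc : Prop := ∀ (partB : Bool) (state : Bool × (List (Int × Option Int))) (current : String × List String), Dom_lineacc partB state current → Spec_lineacc partB state current (lineacc partB state current)

-- ===== LEMMAS AND PROOFS =====

-- what A appends for one matching position (proof-side characterisation of A's loop body)
def pvEmit (partB : Bool) (prev : List (Int × Option Int)) (pos : Int) : List (Int × Option Int) :=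
  (if isDirectionFromPreviousLine pos (-1) prev then [(pos, (some (-1) : Option Int))] else []) ++
  (if isDirectionFromPreviousLine pos 1 prev then [(pos, (some 1 : Option Int))] else []) ++
  (if !partB && isDirectionFromPreviousLine pos 0 prev then [(pos, (some 0 : Option Int))] else [])

theorem pvMem_emit (partB : Bool) (prev : List (Int × Option Int)) (pos : Int) (x : Int × Option Int) :
    x ∈ pvEmit partB prev pos ↔ ∃ dir : Int, dir ∈ pvDirs partB ∧ x = (pos, some dir) ∧ isDirectionFromPreviousLine pos dir prev := by
  cases partB <;>
    simp only [pvEmit, pvDirs, List.mem_append, Bool.not_true, Bool.not_false, Bool.true_and,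
      Bool.false_and] <;>
    split_ifs with h1 h2 h3 <;>
    simp_all <;> tauto

theorem pvMem_hits_inner (a : Int) (ch : String) (line : List String) (ds : List Int) (s : PySem.Set (Int × Option Int)) (x : Int × Option Int) :
    x ∈ ds.foldl (fun s dir =>
      let p := a + dir
      if (decide (0 ≤ p) && decide (p < (line.length : Int))) && (PySem.List.pyGet? line p == some ch)
      then PySem.Set.add s (p, some dir) else s) s ↔
    x ∈ s ∨ ∃ dir ∈ ds, x = (a + dir, some dir) ∧ 0 ≤ a + dir ∧ a + dir < (line.length : Int) ∧ PySem.List.pyGet? line (a + dir) = some ch := by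
  induction ds generalizing s with
  | nil => simp
  | cons d t ih =>
    simp only [List.foldl_cons, List.mem_cons, ih]
    by_cases h : (decide (0 ≤ a + d) && decide (a + d < (line.length : Int))) && (PySem.List.pyGet? line (a + d) == some ch)
    · simp only [h, if_true, PySem.Set.mem_add]
      simp only [Bool.and_eq_true, decide_eq_true_eq, beq_iff_eq] at h
      constructor
      · rintro (((hx | rfl) | ⟨dir, hd, hrest⟩))
        · exact Or.inl hx
        · exact Or.inr ⟨d, Or.inl rfl, rfl, h.1.1, h.1.2, h.2⟩
        · exact Or.inr ⟨dir, Or.inr hd, hrest⟩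
      · rintro (hx | ⟨dir, (rfl | hd), hrest⟩)
        · exact Or.inl (Or.inl hx)
        · exact Or.inl (Or.inr hrest.1)
        · exact Or.inr ⟨dir, hd, hrest⟩
    · rw [if_neg (by simpa using h)]
      simp only [Bool.and_eq_true, decide_eq_true_eq, beq_iff_eq, not_and] at h
      constructor
      · rintro (hx | ⟨dir, hd, hrest⟩)
        · exact Or.inl hx
        · exact Or.inr ⟨dir, Or.inr hd, hrest⟩
      · rintro (hx | ⟨dir, (rfl | hd), hrest⟩)
        · exact Or.inl hx
        · exact absurd hrest (by intro ⟨_, h1, h2, h3⟩; exact (by simp_all : False))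
        · exact Or.inr ⟨dir, hd, hrest⟩

theorem pvMem_hits (dirs : List Int) (ch : String) (line : List String) (prev : List (Int × Option Int)) (x : Int × Option Int) :
    x ∈ pvHits dirs ch line prev ↔ ∃ ad ∈ prev, ∃ dir ∈ pvDlist dirs ad.2, x = (ad.1 + dir, some dir) ∧
      0 ≤ ad.1 + dir ∧ ad.1 + dir < (line.length : Int) ∧ PySem.List.pyGet? line (ad.1 + dir) = some ch := by
  unfold pvHits
  suffices h : ∀ (l : List (Int × Option Int)) (s : PySem.Set (Int × Option Int)),
      x ∈ l.foldl (fun s ad =>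
        (pvDlist dirs ad.2).foldl (fun s dir =>
          let p := ad.1 + dir
          if (decide (0 ≤ p) && decide (p < (line.length : Int))) && (PySem.List.pyGet? line p == some ch)
          then PySem.Set.add s (p, some dir) else s) s) s ↔
      x ∈ s ∨ ∃ ad ∈ l, ∃ dir ∈ pvDlist dirs ad.2, x = (ad.1 + dir, some dir) ∧
        0 ≤ ad.1 + dir ∧ ad.1 + dir < (line.length : Int) ∧ PySem.List.pyGet? line (ad.1 + dir) = some ch by
    simpa [PySem.Set.empty] using h prev []
  intro l
  induction l with
  | nil => simp
  | cons hd t ih =>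
    intro s
    simp only [List.foldl_cons, ih, pvMem_hits_inner, List.mem_cons]
    constructor
    · rintro (⟨hx | ⟨dir, hd1, hd2⟩⟩ | ⟨ad, hat, hrest⟩)
      · exact Or.inl hx
      · exact Or.inr ⟨hd, Or.inl rfl, dir, hd1, hd2⟩
      · exact Or.inr ⟨ad, Or.inr hat, hrest⟩
    · rintro (hx | ⟨ad, (rfl | hat), hrest⟩)
      · exact Or.inl (Or.inl hx)
      · exact Or.inl (Or.inr hrest)
      · exact Or.inr ⟨ad, hat, hrest⟩

theorem pvNodup_hits (dirs : List Int) (ch : String) (line : List String) (prev : List (Int × Option Int)) :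
    (pvHits dirs ch line prev).Nodup := by
  unfold pvHits
  suffices h : ∀ (l : List (Int × Option Int)) (s : PySem.Set (Int × Option Int)), s.Nodup →
      (l.foldl (fun s ad =>
        (pvDlist dirs ad.2).foldl (fun s dir =>
          let p := ad.1 + dir
          if (decide (0 ≤ p) && decide (p < (line.length : Int))) && (PySem.List.pyGet? line p == some ch)
          then PySem.Set.add s (p, some dir) else s) s) s).Nodup by
    exact h prev [] List.nodup_nil
  have inner : ∀ (a : Int) (ds : List Int) (s : PySem.Set (Int × Option Int)), s.Nodup →
      (ds.foldl (fun s dir =>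
        let p := a + dir
        if (decide (0 ≤ p) && decide (p < (line.length : Int))) && (PySem.List.pyGet? line p == some ch)
        then PySem.Set.add s (p, some dir) else s) s).Nodup := by
    intro a ds
    induction ds with
    | nil => intro s hs; exact hs
    | cons d t ih =>
      intro s hs
      simp only [List.foldl_cons]
      apply ih
      split_ifs with h
      · exact PySem.Set.nodup_add _ _ hs
      · exact hs
  intro l
  induction l with
  | nil => intro s hs; exact hs
  | cons hd t ih =>
    intro s hs
    simp only [List.foldl_cons]
    exact ih _ (inner _ _ _ hs)

theorem pvRank_bounds (d : Option Int) : 0 ≤ pvRank d ∧ pvRank d ≤ 2 := by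
  unfold pvRank; split_ifs <;> omega

theorem pvMem_emit_fst (partB : Bool) (prev : List (Int × Option Int)) (pos : Int) (x : Int × Option Int)
    (h : x ∈ pvEmit partB prev pos) : x.1 = pos := by
  rcases (pvMem_emit partB prev pos x).1 h with ⟨dir, _, rfl, _⟩; rfl

theorem pvPairwise_flat (partB : Bool) (prev : List (Int × Option Int)) (positions : List Int) (h : positions.Pairwise (· < ·)) :
    (positions.flatMap (pvEmit partB prev)).Pairwise (fun a b => pvKey a < pvKey b) := by
  rw [List.pairwise_flatMap]
  constructor
  · intro pos _
    unfold pvEmit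
    split_ifs <;> simp [pvKey, pvRank]
  · refine h.imp fun {a b} hab x hx y hy => ?_
    have hxa := pvMem_emit_fst partB prev a x hx
    have hyb := pvMem_emit_fst partB prev b y hy
    have h1 := pvRank_bounds x.2
    have h2 := pvRank_bounds y.2
    simp only [pvKey, hxa, hyb]
    omega

theorem pvPositions_pairwise (ch : String) (line : List String) :
    (((line.zipIdx.filter (fun ci => ci.1 == ch)).map (fun ci => ((ci.2 : Nat) : Int)))).Pairwise (· < ·) := by
  have h0 : line.zipIdx.Pairwise (fun a b => a.2 < b.2) := by
    rw [List.pairwise_iff_getElem]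
    intro i j hi hj hij
    simp only [List.getElem_zipIdx]
    omega
  exact (h0.filter _).map _ (by intro a b hab; exact_mod_cast hab)

theorem pvMem_positions (ch : String) (line : List String) (pos : Int) :
    pos ∈ ((line.zipIdx.filter (fun ci => ci.1 == ch)).map (fun ci => ((ci.2 : Nat) : Int))) ↔
      0 ≤ pos ∧ pos < (line.length : Int) ∧ PySem.List.pyGet? line pos = some ch := by
  simp only [List.mem_map, List.mem_filter, List.mem_zipIdx_iff_getElem?, beq_iff_eq]
  constructor
  · rintro ⟨⟨c, i⟩, ⟨hget, rfl⟩, rfl⟩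
    obtain ⟨hi, hval⟩ := List.getElem?_eq_some_iff.1 hget
    refine ⟨by positivity, by exact_mod_cast hi, ?_⟩
    rw [PySem.List.pyGet?_natCast]
    simpa using hget
  · rintro ⟨h0, hlen, hget⟩
    rw [PySem.List.pyGet?_of_nonneg line h0] at hget
    refine ⟨(ch, pos.toNat), ⟨by simpa using hget, rfl⟩, by omega⟩

theorem pvIsDir_iff (pos dir : Int) (prev : List (Int × Option Int)) :
    isDirectionFromPreviousLine pos dir prev = true ↔
      ∃ ad ∈ prev, pos - dir = ad.1 ∧ (ad.2 = none ∨ ad.2 = some dir) := by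
  simp [isDirectionFromPreviousLine, List.any_eq_true]

theorem pvMem_dlist (dirs : List Int) (d : Option Int) (dir : Int) :
    dir ∈ pvDlist dirs d ↔ dir ∈ dirs ∧ (d = none ∨ d = some dir) := by
  cases d with
  | none => simp [pvDlist]
  | some v =>
    simp only [pvDlist]
    split_ifs with h <;> simp_all <;> aesop

theorem pvMem_equiv (partB : Bool) (ch : String) (line : List String) (prev : List (Int × Option Int)) (x : Int × Option Int) :
    x ∈ (((line.zipIdx.filter (fun ci => ci.1 == ch)).map (fun ci => ((ci.2 : Nat) : Int))).flatMap (pvEmit partB prev)) ↔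
      x ∈ pvHits (pvDirs partB) ch line prev := by
  rw [List.mem_flatMap, pvMem_hits]
  constructor
  · rintro ⟨pos, hpos, hx⟩
    rcases (pvMem_emit partB prev pos x).1 hx with ⟨dir, hdir, rfl, hisdir⟩
    rcases (pvIsDir_iff pos dir prev).1 hisdir with ⟨ad, had, heq, hmatch⟩
    rcases (pvMem_positions ch line pos).1 hpos with ⟨h0, hlen, hget⟩
    have hpos_eq : pos = ad.1 + dir := by omega
    subst hpos_eq
    exact ⟨ad, had, dir, (pvMem_dlist _ _ _).2 ⟨hdir, hmatch⟩, rfl, h0, hlen, hget⟩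
  · rintro ⟨ad, had, dir, hdl, rfl, h0, hlen, hget⟩
    rcases (pvMem_dlist _ _ _).1 hdl with ⟨hdir, hmatch⟩
    refine ⟨ad.1 + dir, (pvMem_positions ch line _).2 ⟨h0, hlen, hget⟩, ?_⟩
    exact (pvMem_emit partB prev _ _).2 ⟨dir, hdir, rfl, (pvIsDir_iff _ _ _).2 ⟨ad, had, by omega, hmatch⟩⟩

-- ===== VERDICT (by name: the statement is the Claim_ definition above) =====
theorem lineacc_spec : Claim_equal_lineacc := by
  intro partB state current _
  obtain ⟨init, prev⟩ := state
  obtain ⟨ch, line⟩ := current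
  unfold Spec_lineacc
  by_cases hp : prev.isEmpty
  · by_cases hi : init
    · -- prev = [], init = true: both emit (pos, None) per matching position
      simp only [lineacc, lineacc_alt, hp, hi, Bool.not_true, Bool.and_false, Bool.false_eq_true,
        if_false]
      rw [PySem.List.foldl_append_singleton_eq_map]
      simp [List.map_map, Function.comp_def]
    · simp [lineacc, lineacc_alt, hp, hi]
  · -- prev nonempty
    have hpf : prev.isEmpty = false := by simpa using hp
    simp only [lineacc, lineacc_alt, hpf, Bool.false_and, Bool.false_eq_true, if_false,
      Bool.not_false, if_true]
    refine Prod.ext rfl ?_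
    have hpw := pvPairwise_flat partB prev _ (pvPositions_pairwise ch line)
    have hnodupA : (((line.zipIdx.filter (fun ci => ci.1 == ch)).map (fun ci => ((ci.2 : Nat) : Int))).flatMap (pvEmit partB prev)).Nodup :=
      hpw.imp (fun hlt heq => by subst heq; exact absurd hlt (lt_irrefl _))
    have hperm : (((line.zipIdx.filter (fun ci => ci.1 == ch)).map (fun ci => ((ci.2 : Nat) : Int))).flatMap (pvEmit partB prev)).Perm
        (pvHits (pvDirs partB) ch line prev) := by
      rw [List.perm_ext_iff_of_nodup hnodupA (pvNodup_hits _ _ _ _)]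
      exact pvMem_equiv partB ch line prev
    trans (((line.zipIdx.filter (fun ci => ci.1 == ch)).map (fun ci => ((ci.2 : Nat) : Int))).flatMap (pvEmit partB prev))
    · refine (PySem.List.foldl_congr_mem _ _ _ _ ?_).trans (PySem.List.foldl_append_eq_flatMap _ _ _)
      intro a pos _
      simp only [pvEmit]
      split_ifs <;> simp_all
    · exact (PySem.List.sorted_eq_of_perm_of_pairwise_lt _ _ _ hperm hpw).symm
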